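-- pv_equiv track=rewrite | github.com/JackZH26/SCLib_JZIS | scripts/enrich_papers_s2.py | _map_paper_type
-- ===== SOURCE A (Python) =====
-- _S2_TYPE_MAP: dict[str, str] = {
--     "JournalArticle": "experimental",   # default for journal articles
--     "Conference": "experimental",
--     "Review": "review",
--     "CaseReport": "experimental",
--     "ClinicalTrial": "experimental",
--     "Editorial": "review",
--     "LettersAndComments": "experimental",
--     "MetaAnalysis": "review",
--     "Study": "experimental",
--     "Book": "review",
--     "BookSection": "review",
--     "Dataset": "computational",
-- }
--
-- def _map_paper_type(s2_types: list[str] | None) -> str | None: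
--     """Map S2 publicationTypes list to a single paper_type string."""
--     if not s2_types:
--         return None
--     # If "Review" is present anywhere, it's a review
--     if "Review" in s2_types:
--         return "review"
--     # Otherwise take the first recognized type
--     for t in s2_types:
--         if t in _S2_TYPE_MAP:
--             return _S2_TYPE_MAP[t]
--     return None
-- ===== SOURCE B (Python) =====
-- _S2_TYPE_MAP: dict[str, str] = {
--     "JournalArticle": "experimental",
--     "Conference": "experimental",
--     "Review": "review",
--     "CaseReport": "experimental",
--     "ClinicalTrial": "experimental",
--     "Editorial": "review",
--     "LettersAndComments": "experimental",
--     "MetaAnalysis": "review",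
--     "Study": "experimental",
--     "Book": "review",
--     "BookSection": "review",
--     "Dataset": "computational",
-- }
--
-- def _map_paper_type(s2_types):
--     """Map S2 publicationTypes list to a single paper_type string.
--
--     One exhaustion-free fold over the list: accumulate (seen_review, first
--     recognized mapping) as a pair, then combine the two facts at the end.
--     """
--     if not s2_types:
--         return None
--     seen_review, first = False, None
--     for t in s2_types:
--         seen_review = seen_review or t == "Review"
--         if first is None:
--             first = _S2_TYPE_MAP.get(t)
--     return "review" if seen_review else first
-- ===== Notes on version B (the rewrite author's own statement) =====
-- stated objective: alternative
-- what changed: Replaces A's staged scans with early returns (Review membership test, then a first-recognized scan that returns from inside the loop) by one exception-free fold over a pair accumulator (seen_review flag, first recognized mapping) combined only after the loop.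
import Mathlib
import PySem

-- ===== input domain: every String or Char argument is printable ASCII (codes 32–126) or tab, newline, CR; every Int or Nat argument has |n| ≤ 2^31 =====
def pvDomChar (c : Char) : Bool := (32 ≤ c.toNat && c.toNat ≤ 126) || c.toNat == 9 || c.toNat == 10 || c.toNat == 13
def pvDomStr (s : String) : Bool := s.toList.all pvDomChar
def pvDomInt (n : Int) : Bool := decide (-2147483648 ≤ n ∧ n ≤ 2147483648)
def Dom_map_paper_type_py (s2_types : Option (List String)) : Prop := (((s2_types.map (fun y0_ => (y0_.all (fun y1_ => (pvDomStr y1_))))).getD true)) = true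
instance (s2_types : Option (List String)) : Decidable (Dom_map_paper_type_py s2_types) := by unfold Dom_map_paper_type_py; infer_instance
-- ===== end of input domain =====

-- B replaces A's staged scans with early exits by one full fold over a pair
-- accumulator (seen_review, first recognized mapping), combined after the loop
-- (objective: alternative decomposition, same O(n) cost).


-- the module-level _S2_TYPE_MAP dict
def s2TypeMap : PySem.Dict String String := PySem.Dict.ofList
  [("JournalArticle", "experimental"), ("Conference", "experimental"),
   ("Review", "review"), ("CaseReport", "experimental"),
   ("ClinicalTrial", "experimental"), ("Editorial", "review"),
   ("LettersAndComments", "experimental"), ("MetaAnalysis", "review"),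
   ("Study", "experimental"), ("Book", "review"), ("BookSection", "review"),
   ("Dataset", "computational")]

-- ===== PORT A =====
-- A's second scan: "for t in s2_types: if t in _S2_TYPE_MAP: return _S2_TYPE_MAP[t]" then "return None"
def mapPaperTypeALoop (l : List String) : Option String :=
  match l with
  | [] => none
  | t :: ts =>
    match s2TypeMap.get? t with
    | some v => some v
    | none => mapPaperTypeALoop ts

def map_paper_type_py (s2_types : Option (List String)) : Option String :=
  match s2_types with
  | none => none
  | some l =>
    if l = [] then none
    else if l.contains "Review" then some "review"
    else mapPaperTypeALoop l

-- ===== PORT B =====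
-- B's loop body: state = (seen_review, first); no early exit, the whole list is folded
def mapPaperTypeBStep (st : Bool × Option String) (t : String) : Bool × Option String :=
  (st.1 || t == "Review", if st.2 = none then s2TypeMap.get? t else st.2)

def map_paper_type_py_alt (s2_types : Option (List String)) : Option String :=
  match s2_types with
  | none => none
  | some l =>
    if l = [] then none
    else
      let st := l.foldl mapPaperTypeBStep (false, none)
      if st.1 then some "review" else st.2

-- ===== PRECONDITION & SPEC =====
def Spec_map_paper_type_py (s2_types : Option (List String)) (out : Option String) : Prop := out = map_paper_type_py_alt s2_types
instance (s2_types : Option (List String)) (out : Option String) : Decidable (Spec_map_paper_type_py s2_types out) := by unfold Spec_map_paper_type_py; infer_instance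

-- ===== CLAIM (what is proved, stated in full; the proofs are below) =====
def Claim_equal_map_paper_type_py : Prop := ∀ (s2_types : Option (List String)), Dom_map_paper_type_py s2_types → Spec_map_paper_type_py s2_types (map_paper_type_py s2_types)

-- ===== LEMMAS AND PROOFS =====

-- B's fold computes exactly ("Review" seen, first state ∨ A's first-recognized scan)
theorem foldB_eq (l : List String) : ∀ (b : Bool) (f : Option String),
    l.foldl mapPaperTypeBStep (b, f) =
      (b || l.contains "Review", if f = none then mapPaperTypeALoop l else f) := by
  induction l with
  | nil => intro b f; cases f <;> simp [mapPaperTypeALoop]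
  | cons t ts ih =>
    intro b f
    simp only [List.foldl_cons, mapPaperTypeBStep, ih, List.contains_cons]
    refine Prod.ext ?_ ?_
    · cases b <;> simp [BEq.comm]
    · cases f with
      | some v => simp
      | none =>
        cases h : s2TypeMap.get? t <;> simp [mapPaperTypeALoop, h]

-- ===== VERDICT (by name: the statement is the Claim_ definition above) =====
theorem map_paper_type_py_spec : Claim_equal_map_paper_type_py := by
  intro s2_types _
  unfold Spec_map_paper_type_py map_paper_type_py map_paper_type_py_alt
  cases s2_types with
  | none => rfl
  | some l =>
    by_cases h : l = []
    · simp [h]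
    · simp only [if_neg h, foldB_eq]
      cases hc : l.contains "Review" <;> simp
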